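-- pv_equiv track=rewrite | github.com/hannayangg/penwing | Quest/12.py | F
-- ===== SOURCE A (Python) =====
-- def F(n):
--   dp = [0]
--   i = 1
--   while i <= n:
--     for j in range(i):
--       dp.append(1 + dp[j-i])
--     i *= 2
--   return dp[:n+1]
-- ===== SOURCE B (Python) =====
-- def F(n):
--     dp = [0]
--     for i in range(1, n + 1):
--         dp.append(dp[i // 2] + i % 2)
--     return dp[:n + 1]
-- ===== Notes on version B (the rewrite author's own statement) =====
-- stated objective: simpler
-- what changed: Replaces A's power-of-two block-doubling recurrence (inner loop copying a whole block via negative indices, i *= 2, then truncate) with the direct per-integer popcount recurrence dp[i] = dp[i//2] + i%2 over i = 1..n.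
import Mathlib
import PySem

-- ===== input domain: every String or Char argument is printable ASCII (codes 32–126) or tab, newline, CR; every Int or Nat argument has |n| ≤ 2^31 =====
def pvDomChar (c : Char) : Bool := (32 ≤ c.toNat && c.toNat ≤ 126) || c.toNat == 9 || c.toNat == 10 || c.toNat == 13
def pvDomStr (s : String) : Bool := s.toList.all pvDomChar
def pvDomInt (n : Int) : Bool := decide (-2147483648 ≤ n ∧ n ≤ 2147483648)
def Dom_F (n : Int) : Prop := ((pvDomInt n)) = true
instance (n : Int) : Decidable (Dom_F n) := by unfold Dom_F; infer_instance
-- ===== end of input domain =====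

-- B replaces A's power-of-two block-doubling popcount DP with the direct
-- per-integer recurrence dp[i] = dp[i//2] + i%2 (objective: simpler).

-- ===== PORT A =====
-- inner 'for j in range(i): dp.append(1 + dp[j-i])'; dp[j-i] is always in
-- range in A (the negative index reaches back into the block just built),
-- so the total pyGetD with default 0 is exact here.
def FinnerA (i : Int) (dp : List Int) : List Int :=
  (PySem.List.pyRange 0 i 1).foldl
    (fun d j => d ++ [1 + PySem.List.pyGetD d (j - i) 0]) dp

-- 'while i <= n: … ; i *= 2'; the 0 < i argument only justifies termination
-- (i starts at 1 and doubles), it does not alter the computation.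
def FwhileA (n : Int) (dp : List Int) (i : Int) (hi : 0 < i) : List Int :=
  if h : i ≤ n then FwhileA n (FinnerA i dp) (i * 2) (by omega) else dp
termination_by (n + 1 - i).toNat
decreasing_by omega

def F (n : Int) : List Int :=
  PySem.List.slice (FwhileA n [0] 1 (by omega)) none (some (n + 1))

-- ===== PORT B =====
def F_alt (n : Int) : List Int :=
  PySem.List.slice
    ((PySem.List.pyRange 1 (n + 1) 1).foldl
      (fun d i => d ++ [PySem.List.pyGetD d (PySem.Int.floordiv i 2) 0 + PySem.Int.mod i 2]) [0])
    none (some (n + 1))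

-- ===== PRECONDITION & SPEC =====
def Spec_F (n : Int) (out : List Int) : Prop := out = F_alt n
instance (n : Int) (out : List Int) : Decidable (Spec_F n out) := by unfold Spec_F; infer_instance

-- ===== CLAIM (what is proved, stated in full; the proofs are below) =====
def Claim_equal_F : Prop := ∀ (n : Int), Dom_F n → Spec_F n (F n)

-- ===== LEMMAS AND PROOFS =====

-- popcount, the common characterisation of both DPs
def pc (n : Nat) : Int :=
  if n = 0 then 0 else pc (n / 2) + ((n % 2 : Nat) : Int)
termination_by n
decreasing_by exact Nat.div_lt_self (by omega) (by norm_num)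

lemma pc_zero : pc 0 = 0 := by rw [pc]; simp

lemma pc_eq (n : Nat) : pc n = pc (n / 2) + ((n % 2 : Nat) : Int) := by
  by_cases h : n = 0
  · subst h; simp [pc_zero]
  · rw [pc]; simp [h]

lemma pc_double (j : Nat) : pc (2 * j) = pc j := by
  rw [pc_eq (2 * j)]
  simp [Nat.mul_mod_right]

lemma pc_pow_add (t j : Nat) (h : j < 2 ^ t) : pc (2 ^ t + j) = 1 + pc j := by
  induction t generalizing j with
  | zero =>
    interval_cases j
    rw [show 2 ^ 0 + 0 = 1 from by norm_num, pc_eq 1, pc_zero]; simp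
  | succ t ih =>
    rw [pc_eq (2 ^ (t + 1) + j), pc_eq j]
    have h1 : (2 ^ (t + 1) + j) / 2 = 2 ^ t + j / 2 := by
      have : 2 ^ (t + 1) = 2 * 2 ^ t := by ring
      omega
    have h2 : (2 ^ (t + 1) + j) % 2 = j % 2 := by
      have : 2 ^ (t + 1) = 2 * 2 ^ t := by ring
      omega
    have h3 : j / 2 < 2 ^ t := by
      have : 2 ^ (t + 1) = 2 * 2 ^ t := by ring
      omega
    rw [h1, h2, ih _ h3]; ring

lemma map_pc_snoc (m : Nat) :
    (List.range m).map pc ++ [pc m] = (List.range (m + 1)).map pc := by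
  rw [List.range_succ, List.map_append]; rfl

lemma inner_aux (t : Nat) : ∀ j : Nat, j ≤ 2 ^ t →
    (PySem.List.pyRange 0 (j : Int) 1).foldl
      (fun d k => d ++ [1 + PySem.List.pyGetD d (k - (2 : Int) ^ t) 0])
      ((List.range (2 ^ t)).map pc)
    = (List.range (2 ^ t + j)).map pc := by
  intro j
  induction j with
  | zero => simp [PySem.List.pyRange_one_eq_nil]
  | succ j ih =>
    intro hj
    have hj' : j < 2 ^ t := by omega
    have hsplit : PySem.List.pyRange 0 ((j : Int) + 1) 1
        = PySem.List.pyRange 0 (j : Int) 1 ++ [(j : Int)] :=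
      PySem.List.pyRange_one_succ_right (by positivity)
    have hc : ((j + 1 : Nat) : Int) = (j : Int) + 1 := by push_cast; ring
    rw [hc, hsplit, List.foldl_append, ih (by omega)]
    simp only [List.foldl_cons, List.foldl_nil]
    -- the negative index j - 2^t reaches element 2j of the current list
    have hidx : (j : Int) - (2 : Int) ^ t = -(((2 ^ t - j : Nat) : Int)) := by
      push_cast [Nat.cast_sub (le_of_lt hj')]; ring
    have hk1 : 0 < 2 ^ t - j := by omega
    have hlen : ((List.range (2 ^ t + j)).map pc).length = 2 ^ t + j := by simp
    have hk2 : 2 ^ t - j ≤ ((List.range (2 ^ t + j)).map pc).length := by omega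
    rw [hidx, PySem.List.pyGetD_neg_natCast _ _ _ hk1 hk2]
    simp only [List.length_map, List.length_range]
    have hpos : 2 ^ t + j - (2 ^ t - j) = 2 * j := by omega
    have hget : ((List.range (2 ^ t + j)).map pc)[2 ^ t + j - (2 ^ t - j)]'(by omega)
        = pc (2 * j) := by
      simp [hpos]
    rw [hget, pc_double]
    have : 1 + pc j = pc (2 ^ t + j) := (pc_pow_add t j hj').symm
    rw [this, map_pc_snoc]
    congr 1

lemma inner_eq (t : Nat) :
    FinnerA ((2 : Int) ^ t) ((List.range (2 ^ t)).map pc)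
      = (List.range (2 ^ (t + 1))).map pc := by
  unfold FinnerA
  have hcast : ((2 ^ t : Nat) : Int) = (2 : Int) ^ t := by push_cast; ring
  have h := inner_aux t (2 ^ t) le_rfl
  rw [hcast] at h
  rw [h]
  congr 1
  ring

lemma while_eq (n : Int) (t : Nat) :
    ∃ L : Nat, FwhileA n ((List.range (2 ^ t)).map pc) ((2 : Int) ^ t) (by positivity)
      = (List.range L).map pc ∧ n < (L : Int) := by
  by_cases h : (2 : Int) ^ t ≤ n
  · obtain ⟨L, hL, hn⟩ := while_eq n (t + 1)
    refine ⟨L, ?_, hn⟩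
    rw [FwhileA]
    simp only [h, dif_pos]
    have hmul : (2 : Int) ^ t * 2 = (2 : Int) ^ (t + 1) := by ring
    rw [inner_eq t]
    rw [show FwhileA n ((List.range (2 ^ (t + 1))).map pc) ((2:Int) ^ t * 2) (by positivity)
        = FwhileA n ((List.range (2 ^ (t + 1))).map pc) ((2:Int) ^ (t + 1)) (by positivity)
      from by congr 1]
    exact hL
  · refine ⟨2 ^ t, ?_, ?_⟩
    · rw [FwhileA]; simp [h]
    · push_cast; omega
termination_by (n + 1 - (2 : Int) ^ t).toNat
decreasing_by
  have hp : (0 : Int) < 2 ^ t := by positivity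
  omega

lemma alt_loop (m : Nat) :
    (PySem.List.pyRange 1 ((m : Int) + 1) 1).foldl
      (fun d i => d ++ [PySem.List.pyGetD d (PySem.Int.floordiv i 2) 0 + PySem.Int.mod i 2]) [0]
    = (List.range (m + 1)).map pc := by
  induction m with
  | zero => simp [PySem.List.pyRange_one_eq_nil, pc_zero]
  | succ m ih =>
    have hc : ((m + 1 : Nat) : Int) + 1 = ((m : Int) + 1) + 1 := by push_cast; ring
    have hsplit : PySem.List.pyRange 1 (((m : Int) + 1) + 1) 1
        = PySem.List.pyRange 1 ((m : Int) + 1) 1 ++ [(m : Int) + 1] :=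
      PySem.List.pyRange_one_succ_right (by omega)
    rw [hc, hsplit, List.foldl_append, ih]
    simp only [List.foldl_cons, List.foldl_nil]
    have hc2 : (m : Int) + 1 = ((m + 1 : Nat) : Int) := by push_cast; ring
    have hfd : PySem.Int.floordiv ((m + 1 : Nat) : Int) 2 = (((m + 1) / 2 : Nat) : Int) := by
      exact_mod_cast PySem.Int.floordiv_natCast (m + 1) 2
    have hmd : PySem.Int.mod ((m + 1 : Nat) : Int) 2 = (((m + 1) % 2 : Nat) : Int) := by
      exact_mod_cast PySem.Int.mod_natCast (m + 1) 2
    rw [hc2, hfd, hmd, PySem.List.pyGetD_natCast]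
    have hget : ((List.range (m + 1)).map pc).getD ((m + 1) / 2) 0 = pc ((m + 1) / 2) := by
      have hlt : (m + 1) / 2 < ((List.range (m + 1)).map pc).length := by simp; omega
      rw [List.getD_eq_getElem _ _ hlt]
      simp
    rw [hget, ← pc_eq (m + 1), map_pc_snoc]

lemma init_eq : ([0] : List Int) = (List.range (2 ^ 0)).map pc := by
  simp [List.range_one, pc_zero]

-- ===== VERDICT (by name: the statement is the Claim_ definition above) =====
theorem F_spec : Claim_equal_F := by
  intro n _
  unfold Spec_F F F_alt
  by_cases hn : 0 ≤ n
  · obtain ⟨m, rfl⟩ : ∃ m : Nat, n = (m : Int) := ⟨n.toNat, (Int.toNat_of_nonneg hn).symm⟩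
    have hB := alt_loop m
    rw [hB]
    have hA := while_eq (m : Int) 0
    rw [init_eq]
    have hone : ((2 : Int) ^ 0) = 1 := by norm_num
    obtain ⟨L, hL, hLn⟩ := hA
    rw [show FwhileA (m : Int) ((List.range (2 ^ 0)).map pc) 1 (by omega)
        = FwhileA (m : Int) ((List.range (2 ^ 0)).map pc) ((2 : Int) ^ 0) (by positivity)
      from by congr 1]
    rw [hL]
    have hcast : (m : Int) + 1 = ((m + 1 : Nat) : Int) := by push_cast; ring
    rw [hcast, PySem.List.slice_to_natCast, PySem.List.slice_to_natCast,
      ← List.map_take, ← List.map_take, List.take_range, List.take_range]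
    have hLm : m + 1 ≤ L := by exact_mod_cast hLn
    congr 2
    all_goals omega
  · -- n < 0 : A's while loop and B's for loop both never run; both sides slice [0]
    rw [FwhileA]
    have h1 : ¬ (1 : Int) ≤ n := by omega
    simp only [h1, dif_neg, not_false_iff]
    rw [PySem.List.pyRange_one_eq_nil (by omega)]
    rfl
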